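-- pv_equiv track=rewrite | github.com/visahak/kaizen | platform-integrations/claw-code/plugins/evolve-lite/lib/config.py | _scalar
-- ===== SOURCE A (Python) =====
-- def _scalar(v):
--     """Convert a Python value to a YAML scalar string, quoting when necessary."""
--     if v is True:
--         return "true"
--     if v is False:
--         return "false"
--     if v is None:
--         return "null"
--
--     # For non-string types, convert to string
--     if not isinstance(v, str):
--         return str(v)
--
--     # Reserved YAML tokens that must be quoted
--     reserved_tokens = {
--         "true",
--         "True",
--         "TRUE",
--         "false",
--         "False",
--         "FALSE",
--         "null",
--         "Null",
--         "NULL",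
--         "~",
--         "yes",
--         "Yes",
--         "YES",
--         "no",
--         "No",
--         "NO",
--         "on",
--         "On",
--         "ON",
--         "off",
--         "Off",
--         "OFF",
--     }
--
--     # YAML indicator characters that require quoting
--     yaml_indicators = set("-?:[]{},'&*#!|>'\"%@`")
--
--     # Check if quoting is needed
--     needs_quoting = (
--         v in reserved_tokens  # Reserved token
--         or v == ""  # Empty string
--         or v[0] in " \t"
--         or v[-1] in " \t"  # Leading/trailing whitespace
--         or "#" in v  # Comment character
--         or any(c in yaml_indicators for c in v)  # YAML special characters
--         or v[0] in yaml_indicators  # Starts with indicator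
--     )
--
--     if needs_quoting:
--         # Use single quotes and escape embedded single quotes by doubling them
--         escaped = v.replace("'", "''")
--         return f"'{escaped}'"
--
--     return v
-- ===== SOURCE B (Python) =====
-- RESERVED = frozenset([
--     "true", "True", "TRUE", "false", "False", "FALSE",
--     "null", "Null", "NULL", "~",
--     "yes", "Yes", "YES", "no", "No", "NO",
--     "on", "On", "ON", "off", "Off", "OFF",
-- ])
--
-- INDICATORS = set("-?:[]{},'&*#!|>\"%@`")  # '#' is already in here
--
--
-- def _scalar(v):
--     """Convert a Python value to a YAML scalar string, quoting when necessary."""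
--     if v is True:
--         return "true"
--     if v is False:
--         return "false"
--     if v is None:
--         return "null"
--     if not isinstance(v, str):
--         return str(v)
--     # One fused pass: build the escaped body while deciding whether quoting is
--     # needed, instead of testing first and transforming afterwards.
--     quote = (v == "" or v in RESERVED
--              or v[:1] in (" ", "\t") or v[-1:] in (" ", "\t"))
--     body = []
--     for c in v:
--         if c in INDICATORS:
--             quote = True
--         body.append("''" if c == "'" else c)
--     return "'" + "".join(body) + "'" if quote else v
-- ===== Notes on version B (the rewrite author's own statement) =====
-- stated objective: alternative
-- what changed: A stages the work as one big or-predicate with three overlapping scans (a comment-character substring test, an any(...) comprehension over the indicator set, and a redundant first-character indicator check) followed by a separate replace pass to escape quotes; B makes ONE fused pass over the characters that simultaneously sets the quote flag on any indicator and builds the escaped body, so there is no replace call, no any(), and no substring scan, and the empty/reserved/edge-whitespace guards use one-character slices instead of indexing.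
import Mathlib
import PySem

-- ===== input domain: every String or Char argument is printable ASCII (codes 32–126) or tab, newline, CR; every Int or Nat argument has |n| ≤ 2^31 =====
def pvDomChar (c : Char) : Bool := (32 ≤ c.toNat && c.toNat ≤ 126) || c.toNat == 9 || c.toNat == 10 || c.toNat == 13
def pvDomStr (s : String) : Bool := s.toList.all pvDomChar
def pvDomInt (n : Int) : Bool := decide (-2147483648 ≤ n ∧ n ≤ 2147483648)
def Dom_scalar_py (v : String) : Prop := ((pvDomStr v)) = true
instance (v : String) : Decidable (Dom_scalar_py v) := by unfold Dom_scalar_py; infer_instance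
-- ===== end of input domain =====

-- B makes ONE fused pass that builds the escaped body while deciding whether quoting is
-- needed, instead of A's staged predicate (three overlapping scans) followed by a replace pass.

-- v[0] in "..." / v[-1] in "..." (reached only for nonempty v; Python's `or` short-circuits first)
def pvFirstIs (l : List Char) (p : Char → Bool) : Bool :=
  match l with | [] => false | c :: _ => p c
def pvLastIs (l : List Char) (p : Char → Bool) : Bool :=
  match l.getLast? with | none => false | some c => p c

-- ===== PORT A =====
-- reserved_tokens : Python set literal of strings
def pvReservedA : PySem.Set String := PySem.Set.ofList
  ["true", "True", "TRUE", "false", "False", "FALSE",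
   "null", "Null", "NULL", "~",
   "yes", "Yes", "YES", "no", "No", "NO",
   "on", "On", "ON", "off", "Off", "OFF"]

-- yaml_indicators = set("-?:[]{},'&*#!|>'\"%@`")
def pvIndicatorsA : PySem.Set Char := PySem.Set.ofList "-?:[]{},'&*#!|>'\"%@`".toList

-- A's needs_quoting or-expression, term by term
def pvNeedsA (v : String) : Bool :=
  PySem.Set.contains pvReservedA v                                     -- v in reserved_tokens
  || (v == "")                                                         -- v == ""
  || pvFirstIs v.toList (fun c => c == ' ' || c == '\t')               -- v[0] in " \t"
  || pvLastIs v.toList (fun c => c == ' ' || c == '\t')                -- v[-1] in " \t"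
  || PySem.Str.isIn "#" v                                              -- "#" in v
  || v.toList.any (fun c => PySem.Set.contains pvIndicatorsA c)        -- any(c in yaml_indicators for c in v)
  || pvFirstIs v.toList (fun c => PySem.Set.contains pvIndicatorsA c)  -- v[0] in yaml_indicators

-- The Lean signature takes a String, so only A's str branch is reachable here;
-- the True/False/None and non-str branches cannot receive an argument.
def scalar_py (v : String) : String :=
  if pvNeedsA v then "'" ++ PySem.Str.replace v "'" "''" ++ "'" else v

-- ===== PORT B =====
def pvReservedB : PySem.Set String := PySem.Set.ofList
  ["true", "True", "TRUE", "false", "False", "FALSE",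
   "null", "Null", "NULL", "~",
   "yes", "Yes", "YES", "no", "No", "NO",
   "on", "On", "ON", "off", "Off", "OFF"]

-- INDICATORS = set("-?:[]{},'&*#!|>\"%@`")
def pvIndicatorsB : PySem.Set Char := PySem.Set.ofList "-?:[]{},'&*#!|>\"%@`".toList

-- "''" if c == "'" else c  (one appended piece of the body)
def pvEsc (c : Char) : List Char := if c == '\'' then ['\'', '\''] else [c]

-- quote = v == "" or v in RESERVED or v[:1] in (" ", "\t") or v[-1:] in (" ", "\t")
def pvQuote0 (v : String) : Bool :=
  (v == "") || PySem.Set.contains pvReservedB v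
  || (PySem.List.slice v.toList none (some 1) == [' ']
      || PySem.List.slice v.toList none (some 1) == ['\t'])
  || (PySem.List.slice v.toList (some (-1)) none == [' ']
      || PySem.List.slice v.toList (some (-1)) none == ['\t'])

-- the fused loop of Source B: state (quote, body), one step per character
def scalar_py_alt (v : String) : String :=
  let st := v.toList.foldl
    (fun (st : Bool × List Char) c =>
      (st.1 || PySem.Set.contains pvIndicatorsB c, st.2 ++ pvEsc c))
    (pvQuote0 v, [])
  if st.1 then "'" ++ String.ofList st.2 ++ "'" else v

-- ===== PRECONDITION & SPEC =====
def Spec_scalar_py (v : String) (out : String) : Prop := out = scalar_py_alt v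
instance (v : String) (out : String) : Decidable (Spec_scalar_py v out) := by unfold Spec_scalar_py; infer_instance

-- ===== CLAIM =====
def Claim_equal_scalar_py : Prop := ∀ (v : String), Dom_scalar_py v → Spec_scalar_py v (scalar_py v)

-- ===== LEMMAS AND PROOFS =====

-- A's indicator set literal dedups its repeated quote to exactly B's indicator set
theorem pvIndicators_eq : pvIndicatorsA = pvIndicatorsB := by decide

theorem pvReserved_eq : pvReservedA = pvReservedB := by decide

-- the fused fold = (initial flag OR an indicator occurs, accumulator ++ escaped body)
theorem foldl_fused (l : List Char) (q : Bool) (acc : List Char) :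
    l.foldl (fun (st : Bool × List Char) c =>
        (st.1 || PySem.Set.contains pvIndicatorsB c, st.2 ++ pvEsc c)) (q, acc)
      = (q || l.any (fun c => PySem.Set.contains pvIndicatorsB c), acc ++ l.flatMap pvEsc) := by
  induction l generalizing q acc with
  | nil => simp
  | cons c cs ih =>
      rw [List.foldl_cons, ih]
      simp [Bool.or_assoc]

-- replacing "'" by "''" is exactly the per-character escape map
theorem go_esc (l : List Char) (fuel : Nat) (acc : List Char) (h : l.length ≤ fuel) :
    PySem.Chars.replace.go ['\''] ['\'', '\''] fuel l acc
      = acc.reverse ++ l.flatMap pvEsc := by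
  induction l generalizing fuel acc with
  | nil => cases fuel <;> simp [PySem.Chars.replace.go]
  | cons c cs ih =>
      cases fuel with
      | zero => simp at h
      | succ n =>
          simp only [PySem.Chars.replace.go]
          simp only [List.length_cons] at h
          by_cases hc : c = '\''
          · subst hc
            have hp : ['\''].isPrefixOf ('\'' :: cs) = true := by simp [List.isPrefixOf]
            rw [if_pos hp]
            simp only [List.length_cons, List.length_nil, Nat.zero_add, List.drop_succ_cons,
              List.drop_zero]
            rw [ih _ _ (by omega)]
            simp [pvEsc]
          · have hp : ¬ ['\''].isPrefixOf (c :: cs) = true := by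
              simp [List.isPrefixOf]
              exact fun hh => hc hh.symm
            rw [if_neg hp]
            rw [ih _ _ (by omega)]
            simp [pvEsc, hc]

theorem replace_esc (v : String) :
    (PySem.Str.replace v "'" "''").toList = v.toList.flatMap pvEsc := by
  rw [PySem.Str.toList_replace]
  show PySem.Chars.replace v.toList ['\''] ['\'', '\''] = _
  rw [PySem.Chars.replace]
  rw [if_neg (by simp)]
  rw [go_esc _ _ _ le_rfl]
  simp

-- the two needs-quoting computations coincide
theorem needs_eq (v : String) :
    pvNeedsA v = (pvQuote0 v || v.toList.any (fun c => PySem.Set.contains pvIndicatorsB c)) := by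
  have hfirst : pvFirstIs v.toList (fun c => c == ' ' || c == '\t')
      = (PySem.List.slice v.toList none (some 1) == [' ']
         || PySem.List.slice v.toList none (some 1) == ['\t']) := by
    have h1 : PySem.List.slice v.toList none (some 1) = v.toList.take 1 := by
      have := PySem.List.slice_to_natCast v.toList 1; simpa using this
    rw [h1]; cases v.toList with
    | nil => rfl
    | cons c cs =>
        simp [pvFirstIs, List.take]
  have hlast : pvLastIs v.toList (fun c => c == ' ' || c == '\t')
      = (PySem.List.slice v.toList (some (-1)) none == [' ']
         || PySem.List.slice v.toList (some (-1)) none == ['\t']) := by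
    rw [PySem.List.slice_from_neg_one]
    induction v.toList with
    | nil => rfl
    | cons c cs ih =>
        cases hcs : cs with
        | nil => simp [pvLastIs]
        | cons d ds =>
            rw [← hcs]
            have hlen : (c :: cs).length - 1 = cs.length - 1 + 1 := by
              rw [hcs]; simp
            rw [hlen, List.drop_succ_cons, ← ih]
            rw [hcs]
            simp [pvLastIs, List.getLast?_cons_cons]
  have hindc : ∀ c, PySem.Set.contains pvIndicatorsA c = PySem.Set.contains pvIndicatorsB c := by
    intro c; rw [pvIndicators_eq]
  have hany : (v.toList.any fun c => PySem.Set.contains pvIndicatorsA c)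
      = v.toList.any (fun c => PySem.Set.contains pvIndicatorsB c) := by
    simp only [hindc]
  unfold pvNeedsA pvQuote0
  rw [pvReserved_eq, hfirst, hlast, hany]
  cases hA : v.toList.any (fun c => PySem.Set.contains pvIndicatorsB c) with
  | true =>
      simp only [Bool.or_true]
      have hnil : v.toList ≠ [] := by intro h; rw [h] at hA; simp at hA
      cases hh : PySem.Str.isIn "#" v <;>
        cases hf : pvFirstIs v.toList (fun c => PySem.Set.contains pvIndicatorsA c) <;>
        simp_all
  | false =>
      -- no indicator anywhere: the '#'-scan and the v[0]-indicator term are false too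
      have hhash : PySem.Str.isIn "#" v = false := by
        cases hh : PySem.Str.isIn "#" v
        · rfl
        · exfalso
          have hmem : ('#' : Char) ∈ v.toList :=
            List.singleton_sublist.mp ((PySem.Str.isIn_iff_infix "#" v).mp hh).sublist
          have := List.any_eq_false.mp hA '#' hmem
          simp [pvIndicatorsB] at this
      have hhead : pvFirstIs v.toList (fun c => PySem.Set.contains pvIndicatorsA c) = false := by
        cases hl : v.toList with
        | nil => rfl
        | cons c cs =>
            have hm : c ∈ v.toList := by rw [hl]; exact List.mem_cons_self ..
            have := List.any_eq_false.mp hA c hm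
            simp only [pvFirstIs, hindc c]
            simpa using this
      rw [hhash, hhead]
      cases he : (v == "") <;> cases hr : PySem.Set.contains pvReservedB v <;>
        cases hw1 : (PySem.List.slice v.toList none (some 1) == [' ']
           || PySem.List.slice v.toList none (some 1) == ['\t']) <;>
        cases hw2 : (PySem.List.slice v.toList (some (-1)) none == [' ']
           || PySem.List.slice v.toList (some (-1)) none == ['\t']) <;>
        simp_all

-- ===== VERDICT =====
theorem scalar_py_spec : Claim_equal_scalar_py := by
  intro v _
  unfold Spec_scalar_py scalar_py scalar_py_alt
  rw [foldl_fused, needs_eq]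
  cases h : (pvQuote0 v || v.toList.any (fun c => PySem.Set.contains pvIndicatorsB c)) with
  | false => simp
  | true =>
      have : PySem.Str.replace v "'" "''" = String.ofList (v.toList.flatMap pvEsc) := by
        have := congrArg String.ofList (replace_esc v)
        simpa using this
      rw [this]
      simp
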